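-- pv_equiv track=rewrite | github.com/timethink/Super_MARIO | offline_inference.py | calculate_decode_flops
-- ===== SOURCE A (Python) =====
-- def calculate_decode_flops( prefill_length: int, seq_length: int) -> float:
--     hidden_size = 3584
--     num_hidden_layers = 28
--     vocab_size = 151680
--     flops_per_forward = 0
--     linear_flops = 0
--     attention_flops = 0
--     # 估算每次前向传播的 FLOPS 数量
--     for i in range(seq_length):
--         flops_per_forward += num_hidden_layers * (24 * hidden_size ** 2 + 4 * (prefill_length + i) * hidden_size) + 2 * hidden_size * vocab_size
--         linear_flops += num_hidden_layers * (24 * hidden_size ** 2)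
--         attention_flops += num_hidden_layers * (4 * (prefill_length + i) * hidden_size)
--
--     return flops_per_forward, linear_flops, attention_flops
-- ===== SOURCE B (Python) =====
-- def calculate_decode_flops(prefill_length: int, seq_length: int) -> float:
--     hidden_size = 3584
--     num_hidden_layers = 28
--     vocab_size = 151680
--     n = max(seq_length, 0)
--     # sum over i in range(n) of (prefill_length + i), in closed form
--     tri = n * prefill_length + (n * (n - 1)) // 2
--     linear_flops = n * num_hidden_layers * 24 * hidden_size ** 2
--     attention_flops = num_hidden_layers * 4 * hidden_size * tri
--     flops_per_forward = linear_flops + attention_flops + n * 2 * hidden_size * vocab_size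
--     return flops_per_forward, linear_flops, attention_flops
-- ===== Notes on version B (the rewrite author's own statement) =====
-- stated objective: faster
-- what changed: Replaced the O(seq_length) accumulation loop by closed-form arithmetic-series formulas (Gauss sum) for all three accumulators.
import Mathlib
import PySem

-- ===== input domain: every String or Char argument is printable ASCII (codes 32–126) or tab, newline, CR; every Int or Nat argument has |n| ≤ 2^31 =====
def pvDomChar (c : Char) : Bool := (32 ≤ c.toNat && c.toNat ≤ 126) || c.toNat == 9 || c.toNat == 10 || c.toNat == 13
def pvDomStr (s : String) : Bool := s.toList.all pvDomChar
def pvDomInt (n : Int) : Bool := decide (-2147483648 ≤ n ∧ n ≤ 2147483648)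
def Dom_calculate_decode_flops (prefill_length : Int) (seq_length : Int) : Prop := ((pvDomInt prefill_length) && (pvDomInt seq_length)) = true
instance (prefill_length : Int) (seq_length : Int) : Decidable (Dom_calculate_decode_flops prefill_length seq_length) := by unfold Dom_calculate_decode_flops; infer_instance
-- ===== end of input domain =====

-- B replaces A's per-position accumulation loop with closed-form arithmetic-series formulas (objective: faster, O(1) vs O(seq_length)).
-- Python A returns a 3-tuple; per the task signature both ports return it as a 3-element list.

-- ===== PORT A =====
-- literal transliteration of A's loop: one fold over range(seq_length) carrying the three accumulators
def calculate_decode_flops (prefill_length : Int) (seq_length : Int) : List Int :=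
  let hidden_size : Int := 3584
  let num_hidden_layers : Int := 28
  let vocab_size : Int := 151680
  let st :=
    (PySem.List.pyRange 0 seq_length 1).foldl
      (fun (acc : Int × Int × Int) i =>
        (acc.1 + num_hidden_layers * (24 * hidden_size ^ 2 + 4 * (prefill_length + i) * hidden_size) + 2 * hidden_size * vocab_size,
         acc.2.1 + num_hidden_layers * (24 * hidden_size ^ 2),
         acc.2.2 + num_hidden_layers * (4 * (prefill_length + i) * hidden_size)))
      (0, 0, 0)
  [st.1, st.2.1, st.2.2]

-- ===== PORT B =====
-- closed form: n = max(seq_length, 0); sum_{i<n} (prefill_length + i) = n*prefill_length + n(n-1)//2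
def calculate_decode_flops_alt (prefill_length : Int) (seq_length : Int) : List Int :=
  let hidden_size : Int := 3584
  let num_hidden_layers : Int := 28
  let vocab_size : Int := 151680
  let n : Int := max seq_length 0
  let tri : Int := n * prefill_length + PySem.Int.floordiv (n * (n - 1)) 2
  let linear_flops : Int := n * num_hidden_layers * 24 * hidden_size ^ 2
  let attention_flops : Int := num_hidden_layers * 4 * hidden_size * tri
  let flops_per_forward : Int := linear_flops + attention_flops + n * 2 * hidden_size * vocab_size
  [flops_per_forward, linear_flops, attention_flops]

-- ===== PRECONDITION & SPEC =====
def Spec_calculate_decode_flops (prefill_length : Int) (seq_length : Int) (out : List Int) : Prop := out = calculate_decode_flops_alt prefill_length seq_length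
instance (prefill_length : Int) (seq_length : Int) (out : List Int) : Decidable (Spec_calculate_decode_flops prefill_length seq_length out) := by unfold Spec_calculate_decode_flops; infer_instance

-- ===== CLAIM (what is proved, stated in full; the proofs are below) =====
def Claim_equal_calculate_decode_flops : Prop := ∀ (prefill_length : Int) (seq_length : Int), Dom_calculate_decode_flops prefill_length seq_length → Spec_calculate_decode_flops prefill_length seq_length (calculate_decode_flops prefill_length seq_length)

-- ===== LEMMAS AND PROOFS =====

-- closed form of A's fold, for a range of m steps
lemma pv_loop_closed (p : Int) (m : Nat) :
    (PySem.List.pyRange 0 (m : Int) 1).foldl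
      (fun (acc : Int × Int × Int) i =>
        (acc.1 + 28 * (24 * 3584 ^ 2 + 4 * (p + i) * 3584) + 2 * 3584 * 151680,
         acc.2.1 + 28 * (24 * 3584 ^ 2),
         acc.2.2 + 28 * (4 * (p + i) * 3584)))
      (0, 0, 0)
    = ((m : Int) * (28 * (24 * 3584 ^ 2)) + 28 * 4 * 3584 * ((m : Int) * p + ∑ i ∈ Finset.range m, (i : Int)) + (m : Int) * (2 * 3584 * 151680),
       (m : Int) * (28 * (24 * 3584 ^ 2)),
       28 * 4 * 3584 * ((m : Int) * p + ∑ i ∈ Finset.range m, (i : Int))) := by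
  induction m with
  | zero => simp
  | succ k ih =>
      have h : (((k : Nat) + 1 : Nat) : Int) = (k : Int) + 1 := by push_cast; ring
      rw [h, PySem.List.pyRange_one_succ_right (by positivity), List.foldl_append, ih]
      simp only [List.foldl_cons, List.foldl_nil, Finset.sum_range_succ]
      refine Prod.ext ?_ (Prod.ext ?_ ?_) <;> push_cast <;> ring

lemma pv_gauss (m : Nat) :
    (∑ i ∈ Finset.range m, (i : Int)) = PySem.Int.floordiv ((m : Int) * ((m : Int) - 1)) 2 := by
  have h2 : ((∑ i ∈ Finset.range m, i) * 2 : Nat) = m * (m - 1) := Finset.sum_range_id_mul_two m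
  have hc : (∑ i ∈ Finset.range m, (i : Int)) * 2 = (m : Int) * ((m : Int) - 1) := by
    have := congrArg (fun n : Nat => (n : Int)) h2
    push_cast at this
    rcases Nat.eq_zero_or_pos m with hm | hm
    · subst hm; simp
    · have : (∑ i ∈ Finset.range m, (i : Int)) * 2 = (m : Int) * ((m : Int) - 1) := by
        push_cast [Nat.cast_sub hm] at this ⊢
        linarith [this]
      exact this
  have hfd : PySem.Int.floordiv ((m : Int) * ((m : Int) - 1)) 2 = ((m : Int) * ((m : Int) - 1)) / 2 := by
    simp [PySem.Int.floordiv, Int.fdiv_eq_ediv]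
  rw [hfd, ← hc]
  omega

theorem calculate_decode_flops_spec : Claim_equal_calculate_decode_flops := by
  intro p s _
  unfold Spec_calculate_decode_flops calculate_decode_flops calculate_decode_flops_alt
  dsimp only
  by_cases hs : s ≤ 0
  · rw [PySem.List.pyRange_one_eq_nil hs]
    have hmax : max s 0 = 0 := by omega
    simp [hmax, PySem.Int.floordiv]
  · have hs : 0 < s := by omega
    have hmax : max s 0 = s := by omega
    have hcast : ((s.toNat : Nat) : Int) = s := Int.toNat_of_nonneg (le_of_lt hs)
    rw [hmax]
    rw [← hcast]
    rw [pv_loop_closed p s.toNat, pv_gauss s.toNat]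
    simp only [List.cons.injEq, and_true]
    constructor <;> ring

-- ===== VERDICT (by name: the statement is the Claim_ definition above) =====
-- (theorem above serves as the verdict)
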